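-- pv_equiv track=rewrite | github.com/CalvyPZ/PZwiki-updater | updater_modules/tile/tile_infobox.py | rebuild_infobox
-- ===== SOURCE A (Python) =====
-- CORRECT_ORDER = [
--     "name", "icon", "icon_name", "icon2", "icon_name2", "icon3", "icon_name3", "icon4", "icon_name4",
--     "icon5", "icon_name5", "icon6", "icon_name6", "icon7", "icon_name7", "icon8", "icon_name8",
--     "icon9", "icon_name9", "category", "weight", "size", "placement", "function", "type", "container",
--     "health", "capacity", "liquid_capacity", "freezer_capacity", "fuel", "contents", "strength", "animals",
--     "bed_type", "is_table_top", "is_low", "build_skill", "build_level", "build_tool", "ingredients",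
--     "move_skill", "move_level", "move_tool", "move_type", "pickup_skill", "pickup_level",
--     "pickup_tool", "pickup_tool_tag", "place_tool", "place_tool_tag", "disassemble_skill", "disassemble_level",
--     "disassemble_tool", "disassemble_tool2", "disassemble_tool3", "disassemble_tool4",
--     "disassemble_tool_tag", "disassemble_tool_tag2", "disassemble_tool_tag3", "disassemble_tool_tag4",
--     "products", "tags", "item_id", "item_id_more", "tile_id", "tile_id2",
--     "tile_id3", "tile_id4", "tile_id5", "tile_id6", "tile_id7", "tile_id8", "tile_id9",
--     "sprite_id", "sprite_id2", "sprite_id3", "sprite_id4", "sprite_id5", "sprite_id6", "sprite_id7", "sprite_id8", "sprite_id9",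
--     "sprite_id_more", "infobox_version"
-- ]
--
-- def rebuild_infobox(params):
--     """Rebuild the infobox from parameters, following the correct order."""
--     rebuilt_infobox = "{{Infobox tile\n"
--     # Rebuild in the correct order
--     for key in CORRECT_ORDER:
--         if key in params:
--             rebuilt_infobox += f"|{key}={params[key]}\n"
--     # Add any parameters that aren't in the order list
--     for key, value in params.items():
--         if key not in CORRECT_ORDER:
--             rebuilt_infobox += f"|{key}={value}\n"
--     rebuilt_infobox += "}}"
--     return rebuilt_infobox
-- ===== SOURCE B (Python) =====
-- def _family(base, count):
--     """base, base2, base3, ..., base<count> (the wiki's numbered-parameter convention)."""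
--     return [base] + [base + str(i) for i in range(2, count + 1)]
--
-- def _correct_order():
--     order = ["name"]
--     for icon, icon_name in zip(_family("icon", 9), _family("icon_name", 9)):
--         order += [icon, icon_name]
--     order += ["category", "weight", "size", "placement", "function", "type", "container",
--               "health", "capacity", "liquid_capacity", "freezer_capacity", "fuel", "contents",
--               "strength", "animals", "bed_type", "is_table_top", "is_low", "build_skill",
--               "build_level", "build_tool", "ingredients", "move_skill", "move_level",
--               "move_tool", "move_type", "pickup_skill", "pickup_level", "pickup_tool",
--               "pickup_tool_tag", "place_tool", "place_tool_tag", "disassemble_skill",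
--               "disassemble_level"]
--     order += _family("disassemble_tool", 4) + _family("disassemble_tool_tag", 4)
--     order += ["products", "tags", "item_id", "item_id_more"]
--     order += _family("tile_id", 9) + _family("sprite_id", 9)
--     order += ["sprite_id_more", "infobox_version"]
--     return order
--
-- def rebuild_infobox(params):
--     """Rebuild the infobox: filter params into known/extra via a rank map, sort known by rank, join."""
--     rank = {k: i for i, k in enumerate(_correct_order())}
--     known = [kv for kv in params.items() if kv[0] in rank]
--     extra = [kv for kv in params.items() if kv[0] not in rank]
--     known.sort(key=lambda kv: rank[kv[0]])
--     body = "".join(f"|{k}={v}\n" for k, v in known + extra)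
--     return "{{Infobox tile\n" + body + "}}"
-- ===== Notes on version B (the rewrite author's own statement) =====
-- stated objective: faster
-- what changed: A rescans the 84-key CORRECT_ORDER list for every param and loops over all 84 keys doing a lookup each while concatenating strings; B builds a rank map once (over an order list whose numbered key families are generated), filters params into known/extra, stably sorts the known items by rank and joins the lines, removing the per-param list scan.
import Mathlib
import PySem

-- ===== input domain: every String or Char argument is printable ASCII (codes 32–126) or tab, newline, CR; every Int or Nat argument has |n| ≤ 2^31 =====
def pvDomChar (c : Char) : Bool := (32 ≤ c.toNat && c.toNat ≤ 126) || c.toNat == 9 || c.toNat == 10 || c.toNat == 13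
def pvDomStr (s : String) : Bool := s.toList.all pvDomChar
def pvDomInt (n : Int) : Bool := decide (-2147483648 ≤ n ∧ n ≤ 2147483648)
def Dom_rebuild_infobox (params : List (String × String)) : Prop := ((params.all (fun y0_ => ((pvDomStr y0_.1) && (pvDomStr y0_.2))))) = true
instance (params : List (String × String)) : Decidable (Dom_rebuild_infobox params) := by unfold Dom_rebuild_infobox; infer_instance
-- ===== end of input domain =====

-- B: builds a rank map once over the (family-generated) order list, filters params into
-- known/extra and sorts the known items by rank, replacing A's per-param rescan of CORRECT_ORDER.

-- ===== PORT A =====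
def pvCORRECT_ORDER : List String := [
    "name", "icon", "icon_name", "icon2", "icon_name2", "icon3", "icon_name3", "icon4", "icon_name4",
    "icon5", "icon_name5", "icon6", "icon_name6", "icon7", "icon_name7", "icon8", "icon_name8",
    "icon9", "icon_name9", "category", "weight", "size", "placement", "function", "type", "container",
    "health", "capacity", "liquid_capacity", "freezer_capacity", "fuel", "contents", "strength", "animals",
    "bed_type", "is_table_top", "is_low", "build_skill", "build_level", "build_tool", "ingredients",
    "move_skill", "move_level", "move_tool", "move_type", "pickup_skill", "pickup_level",
    "pickup_tool", "pickup_tool_tag", "place_tool", "place_tool_tag", "disassemble_skill", "disassemble_level",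
    "disassemble_tool", "disassemble_tool2", "disassemble_tool3", "disassemble_tool4",
    "disassemble_tool_tag", "disassemble_tool_tag2", "disassemble_tool_tag3", "disassemble_tool_tag4",
    "products", "tags", "item_id", "item_id_more", "tile_id", "tile_id2",
    "tile_id3", "tile_id4", "tile_id5", "tile_id6", "tile_id7", "tile_id8", "tile_id9",
    "sprite_id", "sprite_id2", "sprite_id3", "sprite_id4", "sprite_id5", "sprite_id6", "sprite_id7", "sprite_id8", "sprite_id9",
    "sprite_id_more", "infobox_version"]

def rebuild_infobox (params : List (String × String)) : String :=
  -- rebuilt_infobox = "{{Infobox tile\n"; for key in CORRECT_ORDER: if key in params: += f"|{key}={params[key]}\n"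
  let step1 := pvCORRECT_ORDER.foldl (fun acc key =>
      match PySem.Dict.get? (PySem.Dict.mk params) key with
      | some v => acc ++ "|" ++ key ++ "=" ++ v ++ "\n"
      | none => acc) "{{Infobox tile\n"
  -- for key, value in params.items(): if key not in CORRECT_ORDER: += f"|{key}={value}\n"
  let step2 := params.foldl (fun acc kv =>
      if pvCORRECT_ORDER.contains kv.1 then acc
      else acc ++ "|" ++ kv.1 ++ "=" ++ kv.2 ++ "\n") step1
  step2 ++ "}}"

-- ===== PORT B =====
-- def _family(base, count): return [base] + [base + str(i) for i in range(2, count + 1)]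
def pvFamily (base : String) (count : Int) : List String :=
  [base] ++ (PySem.List.pyRange 2 (count + 1) 1).map (fun i => base ++ PySem.Int.toStr i)

-- def _correct_order(): ...
def pvCorrectOrderB : List String :=
  let order := ["name"]
  -- for icon, icon_name in zip(_family("icon", 9), _family("icon_name", 9)): order += [icon, icon_name]
  let order := ((pvFamily "icon" 9).zip (pvFamily "icon_name" 9)).foldl
      (fun o p => o ++ [p.1, p.2]) order
  let order := order ++ ["category", "weight", "size", "placement", "function", "type", "container",
      "health", "capacity", "liquid_capacity", "freezer_capacity", "fuel", "contents",
      "strength", "animals", "bed_type", "is_table_top", "is_low", "build_skill",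
      "build_level", "build_tool", "ingredients", "move_skill", "move_level",
      "move_tool", "move_type", "pickup_skill", "pickup_level", "pickup_tool",
      "pickup_tool_tag", "place_tool", "place_tool_tag", "disassemble_skill",
      "disassemble_level"]
  let order := order ++ (pvFamily "disassemble_tool" 4 ++ pvFamily "disassemble_tool_tag" 4)
  let order := order ++ ["products", "tags", "item_id", "item_id_more"]
  let order := order ++ (pvFamily "tile_id" 9 ++ pvFamily "sprite_id" 9)
  let order := order ++ ["sprite_id_more", "infobox_version"]
  order

def rebuild_infobox_alt (params : List (String × String)) : String :=
  -- rank = {k: i for i, k in enumerate(_correct_order())}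
  let rank : PySem.Dict String Int :=
    (PySem.List.enumerate pvCorrectOrderB).foldl
      (fun d p => d.insert p.2 p.1) PySem.Dict.empty
  -- known = [kv for kv in params.items() if kv[0] in rank]
  let known := params.filter (fun kv => rank.contains kv.1)
  -- extra = [kv for kv in params.items() if kv[0] not in rank]
  let extra := params.filter (fun kv => !(rank.contains kv.1))
  -- known.sort(key=lambda kv: rank[kv[0]])  -- rank[k]: every key of `known` is in rank, so getD's default is never used
  let sortedKnown := PySem.List.sorted known (fun kv => (rank.get? kv.1).getD 0)
  -- "{{Infobox tile\n" + "".join(f"|{k}={v}\n" for k, v in known + extra) + "}}"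
  "{{Infobox tile\n" ++
    PySem.Str.join "" ((sortedKnown ++ extra).map (fun kv => "|" ++ kv.1 ++ "=" ++ kv.2 ++ "\n")) ++ "}}"

-- ===== PRECONDITION & SPEC =====
-- Pre_ excludes association lists with duplicate keys: they do not denote a Python dict (a dict
-- cannot contain a duplicate key), so on them the ports' behaviour corresponds to no Python input.
def Pre_rebuild_infobox (params : List (String × String)) : Prop := (params.map Prod.fst).Nodup
instance (params : List (String × String)) : Decidable (Pre_rebuild_infobox params) := by unfold Pre_rebuild_infobox; infer_instance
def pvWitness_rebuild_infobox : (List (String × String)) := [("weight", "0.5"), ("name", "Chair"), ("custom_note", "x")]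

def Spec_rebuild_infobox (params : List (String × String)) (out : String) : Prop := out = rebuild_infobox_alt params
instance (params : List (String × String)) (out : String) : Decidable (Spec_rebuild_infobox params out) := by unfold Spec_rebuild_infobox; infer_instance

-- ===== CLAIM (what is proved, stated in full; the proofs are below) =====
def Claim_equal_rebuild_infobox : Prop := ∀ (params : List (String × String)), Dom_rebuild_infobox params → Pre_rebuild_infobox params → Spec_rebuild_infobox params (rebuild_infobox params)

-- ===== LEMMAS AND PROOFS =====

-- B's generated order list is exactly A's CORRECT_ORDER literal
set_option maxRecDepth 4000 in
theorem pv_orderB_eq : pvCorrectOrderB = pvCORRECT_ORDER := by decide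

-- the rendered line of one (key, value) item
def pvLine (kv : String × String) : String := "|" ++ kv.1 ++ "=" ++ kv.2 ++ "\n"
-- join of lines, "".join(...)
def pvJ (l : List (String × String)) : String := PySem.Str.join "" (l.map pvLine)
-- the items A's first loop emits
def pvOrdered (params : List (String × String)) : List (String × String) :=
  pvCORRECT_ORDER.filterMap (fun k => (PySem.Dict.get? (PySem.Dict.mk params) k).map (fun v => (k, v)))
-- the rank dictionary of B
def pvPos : PySem.Dict String Int :=
  (PySem.List.enumerate pvCORRECT_ORDER).foldl (fun d p => d.insert p.2 p.1) PySem.Dict.empty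

theorem pv_join_cons (s : String) (rest : List String) :
    PySem.Str.join "" (s :: rest) = s ++ PySem.Str.join "" rest := by
  apply String.toList_inj.mp
  cases rest with
  | nil => simp [PySem.Str.toList_join, PySem.Chars.join, List.intercalate]
  | cons t ts => simp [PySem.Str.toList_join, PySem.Chars.join_cons_cons]

theorem pvJ_nil : pvJ [] = "" := by decide

theorem pvJ_cons (kv : String × String) (l : List (String × String)) :
    pvJ (kv :: l) = pvLine kv ++ pvJ l := by
  simp [pvJ, pv_join_cons]

theorem pvJ_append (a b : List (String × String)) : pvJ (a ++ b) = pvJ a ++ pvJ b := by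
  induction a with
  | nil => simp [pvJ_nil]
  | cons x xs ih => simp [pvJ_cons, ih, String.append_assoc]

-- A's first loop in closed form
theorem pvA_loop1 (params : List (String × String)) (co : List String) (init : String) :
    co.foldl (fun acc key =>
      match PySem.Dict.get? (PySem.Dict.mk params) key with
      | some v => acc ++ "|" ++ key ++ "=" ++ v ++ "\n"
      | none => acc) init
    = init ++ pvJ (co.filterMap (fun k => (PySem.Dict.get? (PySem.Dict.mk params) k).map (fun v => (k, v)))) := by
  induction co generalizing init with
  | nil => simp [pvJ_nil]
  | cons c cs ih =>
    simp only [List.foldl_cons, List.filterMap_cons]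
    cases h : PySem.Dict.get? (PySem.Dict.mk params) c with
    | none => simp only [Option.map_none]; rw [ih]
    | some v =>
      simp only [Option.map_some]
      rw [ih, pvJ_cons]
      simp [pvLine, String.append_assoc]

-- A's second loop in closed form
theorem pvA_loop2 (CO : List String) (params : List (String × String)) (init : String) :
    params.foldl (fun acc kv =>
      if CO.contains kv.1 then acc
      else acc ++ "|" ++ kv.1 ++ "=" ++ kv.2 ++ "\n") init
    = init ++ pvJ (params.filter (fun kv => !(CO.contains kv.1))) := by
  induction params generalizing init with
  | nil => simp [pvJ_nil]
  | cons p ps ih =>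
    simp only [List.foldl_cons, List.filter_cons]
    cases h : CO.contains p.1 with
    | true => simp only [Bool.not_true, reduceIte]; rw [ih]; simp
    | false =>
      simp only [Bool.not_false, reduceIte]
      rw [ih, pvJ_cons]
      simp [pvLine, String.append_assoc]

theorem pv_nodup_CO : pvCORRECT_ORDER.Nodup := by decide

-- the rank dictionary built by B's dict comprehension, in closed form
theorem pvPos_get_aux (co : List String) (hco : co.Nodup) :
    ∀ (s : Int) (d : PySem.Dict String Int) (k : String),
      ((PySem.List.enumerate co s).foldl (fun d p => d.insert p.2 p.1) d).get? k
        = if k ∈ co then some (s + (List.idxOf k co : Int)) else d.get? k := by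
  induction co with
  | nil => intro s d k; simp [PySem.List.enumerate]
  | cons c cs ih =>
    intro s d k
    rw [PySem.List.enumerate_cons]
    simp only [List.foldl_cons]
    rw [ih (List.Nodup.of_cons hco) (s+1) (d.insert c s) k]
    by_cases hk : k ∈ cs
    · have hkc : k ≠ c := by
        rintro rfl; exact (List.nodup_cons.mp hco).1 hk
      simp only [List.mem_cons, hk, or_true, if_true, List.idxOf_cons]
      congr 1
      have hcc : (c == k) = false := by simp [Ne.symm hkc]
      rw [hcc]
      simp only [Bool.cond_false]
      push_cast
      ring
    · by_cases hkc : k = c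
      · subst hkc
        simp [hk]
      · simp [hk, hkc, PySem.Dict.get?_insert, List.mem_cons]

theorem pvPos_get (k : String) :
    pvPos.get? k = if k ∈ pvCORRECT_ORDER then some ((List.idxOf k pvCORRECT_ORDER : Int)) else none := by
  rw [pvPos, pvPos_get_aux pvCORRECT_ORDER pv_nodup_CO 0 PySem.Dict.empty k]
  by_cases hk : k ∈ pvCORRECT_ORDER <;> simp [hk, PySem.Dict.get?_empty]

theorem pvPos_contains (k : String) : pvPos.contains k = pvCORRECT_ORDER.contains k := by
  by_cases hk : k ∈ pvCORRECT_ORDER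
  · have h1 : pvPos.get? k ≠ none := by rw [pvPos_get]; simp [hk]
    have h2 : pvPos.contains k = true := by
      by_contra hc
      exact h1 ((PySem.Dict.get?_eq_none_iff_contains pvPos k).mpr (by simpa using hc))
    simp [h2, hk]
  · have h1 : pvPos.get? k = none := by rw [pvPos_get]; simp [hk]
    have h2 : pvPos.contains k = false := (PySem.Dict.get?_eq_none_iff_contains pvPos k).mp h1
    simp [h2, hk]

-- first-match lookup on a duplicate-free association list is exactly membership
theorem pv_get?_iff_mem (params : List (String × String)) (h : (params.map Prod.fst).Nodup)
    (k v : String) : PySem.Dict.get? (PySem.Dict.mk params) k = some v ↔ (k, v) ∈ params := by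
  constructor
  · intro hg
    exact PySem.Dict.mem_items_of_get?_eq_some (PySem.Dict.mk params) hg
  · intro hm
    exact PySem.Dict.get?_of_mem_items (PySem.Dict.mk params) hm h

-- sorted known = the items A's first loop emits
theorem pv_sorted_known (params : List (String × String)) (h : (params.map Prod.fst).Nodup) :
    PySem.List.sorted (params.filter (fun kv => pvPos.contains kv.1))
      (fun kv => (pvPos.get? kv.1).getD 0) = pvOrdered params := by
  have hpair : (pvOrdered params).Pairwise
      (fun a b => (pvPos.get? a.1).getD 0 < (pvPos.get? b.1).getD 0) := by
    rw [pvOrdered, List.pairwise_filterMap]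
    rw [List.pairwise_iff_getElem]
    intro i j hi hj hij x hx y hy
    have hx1 : x.1 = pvCORRECT_ORDER[i] := by
      cases hg : PySem.Dict.get? (PySem.Dict.mk params) pvCORRECT_ORDER[i] with
      | none => rw [hg] at hx; simp at hx
      | some v => rw [hg] at hx; simp at hx; rw [← hx]
    have hy1 : y.1 = pvCORRECT_ORDER[j] := by
      cases hg : PySem.Dict.get? (PySem.Dict.mk params) pvCORRECT_ORDER[j] with
      | none => rw [hg] at hy; simp at hy
      | some v => rw [hg] at hy; simp at hy; rw [← hy]
    rw [hx1, hy1, pvPos_get, pvPos_get]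
    rw [if_pos (List.getElem_mem hi), if_pos (List.getElem_mem hj)]
    rw [List.Nodup.idxOf_getElem pv_nodup_CO i hi, List.Nodup.idxOf_getElem pv_nodup_CO j hj]
    simpa using hij
  apply PySem.List.sorted_eq_of_perm_of_pairwise_lt _ _ _ _ hpair
  -- permutation: both lists are duplicate-free with the same members
  have hnd1 : (pvOrdered params).Nodup :=
    hpair.imp (fun {a b} hab => by rintro rfl; exact lt_irrefl _ hab)
  have hnd2 : (params.filter (fun kv => pvPos.contains kv.1)).Nodup :=
    List.Nodup.filter _ (List.Nodup.of_map Prod.fst h)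
  rw [List.perm_ext_iff_of_nodup hnd1 hnd2]
  rintro ⟨k, v⟩
  constructor
  · intro hm
    rw [pvOrdered, List.mem_filterMap] at hm
    obtain ⟨c, hc, hg⟩ := hm
    cases hgc : PySem.Dict.get? (PySem.Dict.mk params) c with
    | none => rw [hgc] at hg; simp at hg
    | some w =>
      rw [hgc] at hg; simp at hg
      obtain ⟨rfl, rfl⟩ := hg
      rw [List.mem_filter]
      refine ⟨(pv_get?_iff_mem params h c w).mp hgc, ?_⟩
      rw [pvPos_contains]
      simpa using hc
  · intro hm
    rw [List.mem_filter, pvPos_contains] at hm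
    obtain ⟨hmem, hco⟩ := hm
    rw [pvOrdered, List.mem_filterMap]
    refine ⟨k, by simpa using hco, ?_⟩
    rw [(pv_get?_iff_mem params h k v).mpr hmem]
    simp

-- ===== VERDICT (by name: the statement is the Claim_ definition above) =====
theorem rebuild_infobox_spec : Claim_equal_rebuild_infobox := by
  intro params _hdom hpre
  unfold Spec_rebuild_infobox rebuild_infobox rebuild_infobox_alt
  dsimp only
  rw [pvA_loop1, pvA_loop2, pv_orderB_eq]
  rw [show (PySem.List.enumerate pvCORRECT_ORDER).foldl
        (fun (d : PySem.Dict String Int) p => d.insert p.2 p.1) PySem.Dict.empty = pvPos from rfl]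
  rw [pv_sorted_known params hpre]
  rw [show (fun (kv : String × String) => "|" ++ kv.1 ++ "=" ++ kv.2 ++ "\n") = pvLine from rfl]
  rw [show PySem.Str.join "" ((pvOrdered params ++ params.filter (fun kv => !(pvPos.contains kv.1))).map pvLine)
        = pvJ (pvOrdered params ++ params.filter (fun kv => !(pvPos.contains kv.1))) from rfl]
  rw [pvJ_append]
  have hfilt : params.filter (fun kv => !(pvPos.contains kv.1))
      = params.filter (fun kv => !(pvCORRECT_ORDER.contains kv.1)) := by
    apply List.filter_congr
    intro kv _
    rw [pvPos_contains]
  rw [hfilt, pvOrdered]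
  simp [String.append_assoc]
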